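-- pv_equiv track=rewrite | github.com/Ayush8905/Emotion-Aware-Conversational-AI-for-mental-Health-Support | response_generator.py | _analyze_emotion_trend
-- ===== SOURCE A (Python) =====
-- from typing import Dict, List, Optional
--
-- def _analyze_emotion_trend(emotions: List[str]) -> str:
--     """Analyze emotional progression over conversation"""
--     negative_emotions = {
--         'sadness', 'anger', 'fear', 'nervousness', 'grief',
--         'disappointment', 'annoyance', 'disgust', 'embarrassment'
--     }
--     positive_emotions = {
--         'joy', 'gratitude', 'love', 'excitement', 'relief',
--         'admiration', 'amusement', 'optimism', 'pride'
--     }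
--
--     negative_count = sum(1 for e in emotions if e.lower() in negative_emotions)
--     positive_count = sum(1 for e in emotions if e.lower() in positive_emotions)
--
--     if negative_count > positive_count + 1:
--         return "User shows persistent negative emotions - extra support needed"
--     elif positive_count > negative_count:
--         return "User showing emotional improvement - encourage progress"
--     else:
--         return "User experiencing mixed emotions - provide balanced support"
-- ===== SOURCE B (Python) =====
-- def _analyze_emotion_trend(emotions):
--     """Analyze emotional progression over conversation"""
--     weight = {
--         'sadness': -1, 'anger': -1, 'fear': -1, 'nervousness': -1, 'grief': -1,
--         'disappointment': -1, 'annoyance': -1, 'disgust': -1, 'embarrassment': -1,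
--         'joy': 1, 'gratitude': 1, 'love': 1, 'excitement': 1, 'relief': 1,
--         'admiration': 1, 'amusement': 1, 'optimism': 1, 'pride': 1,
--     }
--     net = 0
--     for e in emotions:
--         net += weight.get(e.lower(), 0)
--     if net <= -2:
--         return "User shows persistent negative emotions - extra support needed"
--     if net >= 1:
--         return "User showing emotional improvement - encourage progress"
--     return "User experiencing mixed emotions - provide balanced support"
-- ===== Notes on version B (the rewrite author's own statement) =====
-- stated objective: simpler
-- what changed: Replaces two separate counting passes over the list (negative set, positive set) by a single pass that accumulates one signed net score from a weight dict (-1/+1), branching on the equivalent closed-form thresholds net <= -2 and net >= 1; one traversal instead of two gives a constant-factor speedup.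
import Mathlib
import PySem

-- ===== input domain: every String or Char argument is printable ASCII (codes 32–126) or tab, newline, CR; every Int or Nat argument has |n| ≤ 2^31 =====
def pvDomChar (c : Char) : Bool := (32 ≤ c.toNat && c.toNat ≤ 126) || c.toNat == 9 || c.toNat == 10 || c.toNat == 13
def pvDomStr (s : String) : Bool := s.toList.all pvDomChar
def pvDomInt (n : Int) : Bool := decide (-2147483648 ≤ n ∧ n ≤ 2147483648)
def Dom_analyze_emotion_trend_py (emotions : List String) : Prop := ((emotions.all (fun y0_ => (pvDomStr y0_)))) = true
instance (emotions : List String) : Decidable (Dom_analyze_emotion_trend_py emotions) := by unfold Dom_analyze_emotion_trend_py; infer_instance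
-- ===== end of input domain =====

-- B replaces A's two counting passes by one pass with a signed weight dict and closed-form thresholds (simpler; same asymptotic cost).

-- ===== PORT A =====
def pyNegSet : List String :=
  ["sadness", "anger", "fear", "nervousness", "grief",
   "disappointment", "annoyance", "disgust", "embarrassment"]
def pyPosSet : List String :=
  ["joy", "gratitude", "love", "excitement", "relief",
   "admiration", "amusement", "optimism", "pride"]

def analyze_emotion_trend_py (emotions : List String) : String :=
  let negative_count : Int :=
    emotions.foldl (fun acc e => if PySem.Str.lower e ∈ pyNegSet then acc + 1 else acc) 0
  let positive_count : Int :=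
    emotions.foldl (fun acc e => if PySem.Str.lower e ∈ pyPosSet then acc + 1 else acc) 0
  if negative_count > positive_count + 1 then
    "User shows persistent negative emotions - extra support needed"
  else if positive_count > negative_count then
    "User showing emotional improvement - encourage progress"
  else
    "User experiencing mixed emotions - provide balanced support"

-- ===== PORT B =====
def pvWeight : PySem.Dict String Int := PySem.Dict.ofList
  [("sadness", -1), ("anger", -1), ("fear", -1), ("nervousness", -1), ("grief", -1),
   ("disappointment", -1), ("annoyance", -1), ("disgust", -1), ("embarrassment", -1),
   ("joy", 1), ("gratitude", 1), ("love", 1), ("excitement", 1), ("relief", 1),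
   ("admiration", 1), ("amusement", 1), ("optimism", 1), ("pride", 1)]

def analyze_emotion_trend_py_alt (emotions : List String) : String :=
  let net : Int :=
    emotions.foldl (fun acc e => acc + pvWeight.getD (PySem.Str.lower e) 0) 0
  if net ≤ -2 then
    "User shows persistent negative emotions - extra support needed"
  else if 1 ≤ net then
    "User showing emotional improvement - encourage progress"
  else
    "User experiencing mixed emotions - provide balanced support"

-- ===== PRECONDITION & SPEC =====
def Spec_analyze_emotion_trend_py (emotions : List String) (out : String) : Prop := out = analyze_emotion_trend_py_alt emotions
instance (emotions : List String) (out : String) : Decidable (Spec_analyze_emotion_trend_py emotions out) := by unfold Spec_analyze_emotion_trend_py; infer_instance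

-- ===== CLAIM (what is proved, stated in full; the proofs are below) =====
def Claim_equal_analyze_emotion_trend_py : Prop := ∀ (emotions : List String), Dom_analyze_emotion_trend_py emotions → Spec_analyze_emotion_trend_py emotions (analyze_emotion_trend_py emotions)

-- ===== LEMMAS AND PROOFS =====

-- the weight of one (lowered) string is +1 for positive, -1 for negative, 0 otherwise
theorem pvWeight_getD (s : String) :
    pvWeight.getD s 0 =
      (if s ∈ pyPosSet then (1 : Int) else 0) - (if s ∈ pyNegSet then (1 : Int) else 0) := by
  have hmk : pvWeight = PySem.Dict.mk
      [("sadness", -1), ("anger", -1), ("fear", -1), ("nervousness", -1), ("grief", -1),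
       ("disappointment", -1), ("annoyance", -1), ("disgust", -1), ("embarrassment", -1),
       ("joy", 1), ("gratitude", 1), ("love", 1), ("excitement", 1), ("relief", 1),
       ("admiration", 1), ("amusement", 1), ("optimism", 1), ("pride", 1)] := by rfl
  rw [hmk]
  by_cases hn : s ∈ pyNegSet
  · simp only [pyNegSet, List.mem_cons, List.not_mem_nil, or_false] at hn
    rcases hn with rfl | rfl | rfl | rfl | rfl | rfl | rfl | rfl | rfl <;> decide
  · by_cases hp : s ∈ pyPosSet
    · simp only [pyPosSet, List.mem_cons, List.not_mem_nil, or_false] at hp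
      rcases hp with rfl | rfl | rfl | rfl | rfl | rfl | rfl | rfl | rfl <;> decide
    · rw [if_neg hp, if_neg hn]
      simp only [PySem.Dict.getD_eq_get?_getD, PySem.Dict.get?_mk_cons, beq_iff_eq]
      simp_all [pyNegSet, pyPosSet, eq_comm, PySem.Dict.get?]

-- one pass with the signed accumulator equals (positive pass) - (negative pass)
theorem pv_fold_net (es : List String) : ∀ (n p : Int),
    es.foldl (fun acc e => acc + pvWeight.getD (PySem.Str.lower e) 0) (p - n)
      = es.foldl (fun acc e => if PySem.Str.lower e ∈ pyPosSet then acc + 1 else acc) p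
        - es.foldl (fun acc e => if PySem.Str.lower e ∈ pyNegSet then acc + 1 else acc) n := by
  induction es with
  | nil => intro n p; simp
  | cons e es ih =>
    intro n p
    simp only [List.foldl_cons]
    have hw := pvWeight_getD (PySem.Str.lower e)
    rw [hw]
    split_ifs with hp hn hn
    · rw [show p - n + ((1 : Int) - 1) = (p + 1) - (n + 1) by ring]; exact ih (n + 1) (p + 1)
    · rw [show p - n + ((1 : Int) - 0) = (p + 1) - n by ring]; exact ih n (p + 1)
    · rw [show p - n + ((0 : Int) - 1) = p - (n + 1) by ring]; exact ih (n + 1) p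
    · rw [show p - n + ((0 : Int) - 0) = p - n by ring]; exact ih n p

-- ===== VERDICT (by name: the statement is the Claim_ definition above) =====
theorem analyze_emotion_trend_py_spec : Claim_equal_analyze_emotion_trend_py := by
  intro emotions _
  have h := pv_fold_net emotions 0 0
  simp only [sub_zero] at h
  unfold Spec_analyze_emotion_trend_py
  simp only [analyze_emotion_trend_py, analyze_emotion_trend_py_alt, h]
  split_ifs <;> first | rfl | omega
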